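-- pv_equiv track=rewrite | github.com/harshittiwari/GoogleFoobar | save_beta_rabbit.py | answer
-- ===== SOURCE A (Python) =====
-- def answer(food,grid):
--     matrix = [[set() for y in x] for x in grid]
--     matrix[0][0].add(food)
--     lg = len(grid)
--     for x in range(lg):
--         for y in range(lg):
--             if x == 0 and y == 0: continue
--             if x == 0:
--                 matrix[x][y].add(next(iter(matrix[x][y - 1])) - grid[x][y])
--             elif y == 0:
--                 matrix[x][y].add(next(iter(matrix[x - 1][y])) - grid[x][y])
--             else:
--                 for el in matrix[x - 1][y]:
--                     matrix[x][y].add(el - grid[x][y])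
--                 for el in matrix[x][y - 1]:
--                     matrix[x][y].add(el - grid[x][y])
--     x = -1
--     for el in matrix[lg - 1][lg - 1]:
--         if el >= 0 and (el < x or x<0):x = el
--     return x
-- ===== SOURCE B (Python) =====
-- def answer(food, grid):
--     lg = len(grid)
--     memo = {}
--
--     def reach(x, y):
--         if (x, y) in memo:
--             return memo[(x, y)]
--         if x == 0 and y == 0:
--             vals = {food}
--         else:
--             sources = set()
--             if x > 0:
--                 sources |= reach(x - 1, y)
--             if y > 0:
--                 sources |= reach(x, y - 1)
--             vals = {v - grid[x][y] for v in sources}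
--         memo[(x, y)] = vals
--         return vals
--
--     final = reach(lg - 1, lg - 1)
--     return min([v for v in final if v >= 0], default=-1)
-- ===== Notes on version B (the rewrite author's own statement) =====
-- stated objective: alternative
-- what changed: Replaces the bottom-up matrix-of-sets DP over nested range(lg) loops with a top-down memoized recursion reach(x,y) over the grid plus a filter/min scan (min with default -1) of the final cell's set.
import Mathlib
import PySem

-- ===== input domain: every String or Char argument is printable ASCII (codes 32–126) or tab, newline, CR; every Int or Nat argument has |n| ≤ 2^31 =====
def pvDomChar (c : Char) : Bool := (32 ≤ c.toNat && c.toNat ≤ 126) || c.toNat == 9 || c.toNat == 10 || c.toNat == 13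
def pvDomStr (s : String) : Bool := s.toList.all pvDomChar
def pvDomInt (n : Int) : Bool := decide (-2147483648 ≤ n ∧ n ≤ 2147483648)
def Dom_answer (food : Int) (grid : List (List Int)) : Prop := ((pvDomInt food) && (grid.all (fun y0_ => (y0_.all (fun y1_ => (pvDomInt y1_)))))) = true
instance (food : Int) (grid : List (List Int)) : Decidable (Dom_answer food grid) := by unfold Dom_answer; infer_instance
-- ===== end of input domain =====

-- B replaces A's bottom-up matrix-of-sets DP with a top-down memoized recursion over cells
-- plus a filter/min scan of the final set (objective: alternative decomposition, same cost).

-- ===== PORT A =====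
-- helpers: 2-D read/write on the matrix of sets and on the grid; indices are the loop's
-- range(lg) naturals, in range under Pre_answer, so total getD/set indexing is exact here.
def pvGet2 (m : List (List (List Int))) (x y : Nat) : List Int := (m.getD x []).getD y []
def pvSet2 (m : List (List (List Int))) (x y : Nat) (v : List Int) : List (List (List Int)) :=
  m.set x ((m.getD x []).set y v)
def pvGrid (grid : List (List Int)) (x y : Nat) : Int := (grid.getD x []).getD y 0

-- the body of A's inner loop, one (x, y) iteration of the nested 'for' over range(lg)
def pvBodyA (grid : List (List Int)) (m : List (List (List Int))) (x y : Nat) :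
    List (List (List Int)) :=
  if x = 0 ∧ y = 0 then m
  else if x = 0 then
    -- next(iter(matrix[x][y-1])) = first element of the (nonempty, under Pre_) set
    pvSet2 m x y (PySem.Set.add (pvGet2 m x y) ((pvGet2 m x (y-1)).headD 0 - pvGrid grid x y))
  else if y = 0 then
    pvSet2 m x y (PySem.Set.add (pvGet2 m x y) ((pvGet2 m (x-1) y).headD 0 - pvGrid grid x y))
  else
    pvSet2 m x y ((pvGet2 m x (y-1)).foldl (fun s el => PySem.Set.add s (el - pvGrid grid x y))
      ((pvGet2 m (x-1) y).foldl (fun s el => PySem.Set.add s (el - pvGrid grid x y)) (pvGet2 m x y)))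

def answer (food : Int) (grid : List (List Int)) : Int :=
  let lg := grid.length
  let matrix0 : List (List (List Int)) := grid.map (fun x => x.map (fun _ => (PySem.Set.empty : PySem.Set Int)))
  let matrix1 := pvSet2 matrix0 0 0 (PySem.Set.add (pvGet2 matrix0 0 0) food)
  let matrix2 := (List.range lg).foldl (fun m x =>
    (List.range lg).foldl (fun m y => pvBodyA grid m x y) m) matrix1
  (pvGet2 matrix2 (lg-1) (lg-1)).foldl (fun x el => if el ≥ 0 ∧ (el < x ∨ x < 0) then el else x) (-1)

-- ===== PORT B =====
-- memoized recursion reach(x, y) from Source B; the memo dict is threaded through explicitly.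
def reachB (food : Int) (grid : List (List Int)) (x y : Int)
    (memo : PySem.Dict (Int × Int) (List Int)) : List Int × PySem.Dict (Int × Int) (List Int) :=
  match memo.get? (x, y) with
  | some v => (v, memo)
  | none =>
    let (vals, memo1) :=
      if x = 0 ∧ y = 0 then
        (PySem.Set.add PySem.Set.empty food, memo)
      else
        let s0 : PySem.Set Int := PySem.Set.empty
        let (s1, m1) := if _hx : 0 < x then
            let (u, m1) := reachB food grid (x - 1) y memo
            (PySem.Set.union s0 u, m1)
          else (s0, memo)
        let (s2, m2) := if _hy : 0 < y then
            let (l, m2) := reachB food grid x (y - 1) m1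
            (PySem.Set.union s1 l, m2)
          else (s1, m1)
        -- {v - grid[x][y] for v in sources}; grid[x][y] is only read when sources ≠ ∅,
        -- in which case 0 ≤ x, y and the toNat indexing is exact
        (s2.foldl (fun s v => PySem.Set.add s (v - pvGrid grid x.toNat y.toNat)) PySem.Set.empty, m2)
    (vals, memo1.insert (x, y) vals)
termination_by (x.toNat + y.toNat)
decreasing_by all_goals omega

def answer_alt (food : Int) (grid : List (List Int)) : Int :=
  let lg : Int := grid.length
  let final := (reachB food grid (lg - 1) (lg - 1) PySem.Dict.empty).1
  let cands := final.filter (fun v => decide (0 ≤ v))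
  match PySem.List.min? cands (fun v => v) with
  | some m => m
  | none => -1

-- ===== PRECONDITION & SPEC =====
-- Pre_ excludes exactly the inputs on which A raises: the empty grid (IndexError at
-- matrix[-1][-1]) and grids with a row shorter than len(grid) (IndexError in the loops).
def Pre_answer (food : Int) (grid : List (List Int)) : Prop :=
  grid ≠ [] ∧ ∀ row ∈ grid, grid.length ≤ row.length
instance (food : Int) (grid : List (List Int)) : Decidable (Pre_answer food grid) := by
  unfold Pre_answer; infer_instance
def pvWitness_answer : Int × List (List Int) := (3, [[0, 2], [1, 0]])

def Spec_answer (food : Int) (grid : List (List Int)) (out : Int) : Prop := out = answer_alt food grid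
instance (food : Int) (grid : List (List Int)) (out : Int) : Decidable (Spec_answer food grid out) := by
  unfold Spec_answer; infer_instance

-- ===== CLAIM (what is proved, stated in full; the proofs are below) =====
def Claim_equal_answer : Prop := ∀ (food : Int) (grid : List (List Int)), Dom_answer food grid → Pre_answer food grid → Spec_answer food grid (answer food grid)

-- ===== LEMMAS AND PROOFS =====

-- reference value of the set of path values at cell (x, y): food minus every monotone
-- path sum from (0,0) to (x,y), as the nodup list both programs construct
def cellR (food : Int) (grid : List (List Int)) : Nat → Nat → List Int
  | 0, 0 => [food]
  | 0, y+1 => PySem.Set.ofList ((cellR food grid 0 y).map (fun v => v - pvGrid grid 0 (y+1)))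
  | x+1, 0 => PySem.Set.ofList ((cellR food grid x 0).map (fun v => v - pvGrid grid (x+1) 0))
  | x+1, y+1 => PySem.Set.ofList
      ((cellR food grid x (y+1) ++ cellR food grid (x+1) y).map (fun v => v - pvGrid grid (x+1) (y+1)))

lemma subInj (g : Int) : Function.Injective (fun v : Int => v - g) := by
  intro a b h; simpa using h

lemma add_map {f : Int → Int} (hf : Function.Injective f) (s : PySem.Set Int) (a : Int) :
    (PySem.Set.add s a).map f = PySem.Set.add (s.map f) (f a) := by
  rw [PySem.Set.add_eq_ite, PySem.Set.add_eq_ite]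
  by_cases h : a ∈ s
  · simp [h, List.mem_map_of_injective hf]
  · simp [h, List.mem_map_of_injective hf]

lemma map_foldl_add {f : Int → Int} (hf : Function.Injective f) (L : List Int) :
    ∀ s : PySem.Set Int, (L.foldl PySem.Set.add s).map f = (L.map f).foldl PySem.Set.add (s.map f) := by
  induction L with
  | nil => intro s; simp
  | cons a t ih => intro s; simp only [List.foldl_cons, List.map_cons, ih, add_map hf]

lemma ofList_map_inj {f : Int → Int} (hf : Function.Injective f) (L : List Int) :
    PySem.Set.ofList (L.map f) = (PySem.Set.ofList L).map f := by
  rw [PySem.Set.ofList_eq_foldl, PySem.Set.ofList_eq_foldl, map_foldl_add hf]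
  rfl

lemma setify {f : Int → Int} (hf : Function.Injective f) (L : List Int) :
    PySem.Set.ofList ((PySem.Set.ofList L).map f) = PySem.Set.ofList (L.map f) := by
  rw [← ofList_map_inj hf, PySem.Set.ofList_ofList]

lemma foldl_add_sub_eq (s2 : List Int) (g : Int) (s0 : PySem.Set Int) :
    s2.foldl (fun s v => PySem.Set.add s (v - g)) s0 = PySem.Set.update s0 (s2.map (fun v => v - g)) := by
  rw [PySem.Set.update_map_eq_foldl_add]

lemma cellR_row_sing (food : Int) (grid : List (List Int)) :
    ∀ y, ∃ v, cellR food grid 0 y = [v] := by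
  intro y
  induction y with
  | zero => exact ⟨food, by rw [cellR]⟩
  | succ y ih =>
    obtain ⟨v, hv⟩ := ih
    refine ⟨v - pvGrid grid 0 (y+1), ?_⟩
    rw [cellR, hv]
    simp [PySem.Set.ofList_eq_self_of_nodup]

lemma cellR_col_sing (food : Int) (grid : List (List Int)) :
    ∀ x, ∃ v, cellR food grid x 0 = [v] := by
  intro x
  induction x with
  | zero => exact ⟨food, by rw [cellR]⟩
  | succ x ih =>
    obtain ⟨v, hv⟩ := ih
    refine ⟨v - pvGrid grid (x+1) 0, ?_⟩
    rw [cellR, hv]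
    simp [PySem.Set.ofList_eq_self_of_nodup]

-- ---- A-side: loop invariant ----

def pvProc (x y i j : Nat) : Bool := decide ((i = 0 ∧ j = 0) ∨ i < x ∨ (i = x ∧ j < y))

lemma pvProc_eq (x y x' y' i j : Nat)
    (h : ((i = 0 ∧ j = 0) ∨ i < x ∨ (i = x ∧ j < y)) ↔ ((i = 0 ∧ j = 0) ∨ i < x' ∨ (i = x' ∧ j < y'))) :
    pvProc x y i j = pvProc x' y' i j := by
  simp only [pvProc]; rw [decide_eq_decide]; exact h

def InvA (food : Int) (grid : List (List Int)) (m : List (List (List Int))) (x y : Nat) : Prop :=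
  m.length = grid.length ∧
  (∀ i, (m.getD i []).length = (grid.getD i []).length) ∧
  (∀ i j, i < grid.length → j < grid.length →
    pvGet2 m i j = if pvProc x y i j then cellR food grid i j else [])

lemma get2_set2 (m : List (List (List Int))) (x y : Nat) (v : List Int) (i j : Nat)
    (hx : x < m.length) (hy : y < (m.getD x []).length) :
    pvGet2 (pvSet2 m x y v) i j = if i = x ∧ j = y then v else pvGet2 m i j := by
  unfold pvGet2 pvSet2
  simp only [List.getD, List.getElem?_set]
  by_cases hix : x = i
  · subst hix
    simp only [hx, if_pos]
    simp only [Option.getD_some]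
    simp only [List.getD] at hy ⊢
    rw [List.getElem?_set]
    by_cases hjy : y = j
    · subst hjy; simp [hy]
    · simp [hjy, Ne.symm hjy]
  · have hne : ¬(i = x ∧ j = y) := by rintro ⟨rfl, -⟩; exact hix rfl
    simp [hix, hne]

lemma shape_set2 (m : List (List (List Int))) (x y : Nat) (v : List Int) :
    (pvSet2 m x y v).length = m.length ∧
      ∀ i, ((pvSet2 m x y v).getD i []).length = (m.getD i []).length := by
  constructor
  · simp [pvSet2]
  · intro i
    unfold pvSet2
    simp only [List.getD, List.getElem?_set]
    by_cases hix : x = i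
    · subst hix
      by_cases hx : x < m.length
      · simp [hx]
      · simp [hx]
    · simp [hix]

lemma inv_body (food : Int) (grid : List (List Int))
    (hP : ∀ row ∈ grid, grid.length ≤ row.length)
    (m : List (List (List Int))) (x y : Nat) (hx : x < grid.length) (hy : y < grid.length)
    (h : InvA food grid m x y) : InvA food grid (pvBodyA grid m x y) x (y+1) := by
  obtain ⟨hlen, hrows, hcells⟩ := h
  have hxm : x < m.length := by omega
  have hrowmem : grid.getD x [] ∈ grid := by
    rw [List.getD_eq_getElem _ _ hx]; exact List.getElem_mem _
  have hym : y < (m.getD x []).length := by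
    rw [hrows x]; exact lt_of_lt_of_le hy (hP _ hrowmem)
  unfold pvBodyA
  by_cases h00 : x = 0 ∧ y = 0
  · rw [if_pos h00]
    obtain ⟨rfl, rfl⟩ := h00
    refine ⟨hlen, hrows, ?_⟩
    intro i j hi hj
    rw [hcells i j hi hj]
    rw [pvProc_eq 0 (0+1) 0 0 i j (by omega)]
  · rw [if_neg h00]
    by_cases hx0 : x = 0
    · rw [if_pos hx0]; subst hx0
      have hy0 : y ≠ 0 := fun h' => h00 ⟨rfl, h'⟩
      obtain ⟨k, rfl⟩ : ∃ k, y = k + 1 := ⟨y - 1, by omega⟩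
      simp only [Nat.add_sub_cancel]
      have hleft : pvGet2 m 0 k = cellR food grid 0 k := by
        rw [hcells 0 k hx (by omega)]
        rw [if_pos (by simp [pvProc])]
      have hcur : pvGet2 m 0 (k+1) = [] := by
        rw [hcells 0 (k+1) hx hy]
        rw [if_neg (by simp [pvProc])]
      obtain ⟨v, hv⟩ := cellR_row_sing food grid k
      have hval : PySem.Set.add (pvGet2 m 0 (k+1)) ((pvGet2 m 0 k).headD 0 - pvGrid grid 0 (k+1))
          = cellR food grid 0 (k+1) := by
        rw [hcur, hleft, hv, cellR, hv]
        show PySem.Set.add PySem.Set.empty _ = _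
        rw [PySem.Set.add_eq_ite]
        simp [PySem.Set.ofList_eq_self_of_nodup]
      refine ⟨(shape_set2 _ _ _ _).1.trans hlen,
        fun i => ((shape_set2 _ _ _ _).2 i).trans (hrows i), ?_⟩
      intro i j hi hj
      rw [get2_set2 _ _ _ _ _ _ hxm hym]
      by_cases hij : i = 0 ∧ j = k + 1
      · obtain ⟨rfl, rfl⟩ := hij
        rw [if_pos ⟨rfl, rfl⟩, hval, if_pos (by simp [pvProc])]
      · rw [if_neg hij, hcells i j hi hj]
        rw [pvProc_eq 0 (k+1+1) 0 (k+1) i j (by omega)]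
    · rw [if_neg hx0]
      obtain ⟨a, rfl⟩ : ∃ a, x = a + 1 := ⟨x - 1, by omega⟩
      simp only [Nat.add_sub_cancel]
      by_cases hy0 : y = 0
      · rw [if_pos hy0]; subst hy0
        have hup : pvGet2 m a 0 = cellR food grid a 0 := by
          rw [hcells a 0 (by omega) (by omega)]
          rw [if_pos (by simp [pvProc])]
        have hcur : pvGet2 m (a+1) 0 = [] := by
          rw [hcells (a+1) 0 hx hy]
          rw [if_neg (by simp [pvProc])]
        obtain ⟨v, hv⟩ := cellR_col_sing food grid a
        have hval : PySem.Set.add (pvGet2 m (a+1) 0) ((pvGet2 m a 0).headD 0 - pvGrid grid (a+1) 0)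
            = cellR food grid (a+1) 0 := by
          rw [hcur, hup, hv, cellR, hv]
          show PySem.Set.add PySem.Set.empty _ = _
          rw [PySem.Set.add_eq_ite]
          simp [PySem.Set.ofList_eq_self_of_nodup]
        refine ⟨(shape_set2 _ _ _ _).1.trans hlen,
          fun i => ((shape_set2 _ _ _ _).2 i).trans (hrows i), ?_⟩
        intro i j hi hj
        rw [get2_set2 _ _ _ _ _ _ hxm hym]
        by_cases hij : i = a + 1 ∧ j = 0
        · obtain ⟨rfl, rfl⟩ := hij
          rw [if_pos ⟨rfl, rfl⟩, hval, if_pos (by simp [pvProc])]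
        · rw [if_neg hij, hcells i j hi hj]
          rw [pvProc_eq (a+1) (0+1) (a+1) 0 i j (by omega)]
      · rw [if_neg hy0]
        obtain ⟨b, rfl⟩ : ∃ b, y = b + 1 := ⟨y - 1, by omega⟩
        simp only [Nat.add_sub_cancel]
        have hup : pvGet2 m a (b+1) = cellR food grid a (b+1) := by
          rw [hcells a (b+1) (by omega) hy]
          rw [if_pos (by simp [pvProc])]
        have hleft : pvGet2 m (a+1) b = cellR food grid (a+1) b := by
          rw [hcells (a+1) b hx (by omega)]
          rw [if_pos (by simp [pvProc])]
        have hcur : pvGet2 m (a+1) (b+1) = [] := by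
          rw [hcells (a+1) (b+1) hx hy]
          rw [if_neg (by simp [pvProc])]
        have hval : (pvGet2 m (a+1) b).foldl
              (fun s el => PySem.Set.add s (el - pvGrid grid (a+1) (b+1)))
              ((pvGet2 m a (b+1)).foldl
                (fun s el => PySem.Set.add s (el - pvGrid grid (a+1) (b+1)))
                (pvGet2 m (a+1) (b+1)))
            = cellR food grid (a+1) (b+1) := by
          rw [hup, hleft, hcur]
          rw [← PySem.Set.update_map_eq_foldl_add, ← PySem.Set.update_map_eq_foldl_add]
          show PySem.Set.update (PySem.Set.update PySem.Set.empty _) _ = _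
          rw [← PySem.Set.update_append, ← List.map_append, PySem.Set.update_empty, cellR]
        refine ⟨(shape_set2 _ _ _ _).1.trans hlen,
          fun i => ((shape_set2 _ _ _ _).2 i).trans (hrows i), ?_⟩
        intro i j hi hj
        rw [get2_set2 _ _ _ _ _ _ hxm hym]
        by_cases hij : i = a + 1 ∧ j = b + 1
        · obtain ⟨rfl, rfl⟩ := hij
          rw [if_pos ⟨rfl, rfl⟩, hval, if_pos (by simp [pvProc])]
        · rw [if_neg hij, hcells i j hi hj]
          rw [pvProc_eq (a+1) (b+1+1) (a+1) (b+1) i j (by omega)]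

lemma inv_inner (food : Int) (grid : List (List Int))
    (hP : ∀ row ∈ grid, grid.length ≤ row.length)
    (x : Nat) (hx : x < grid.length) :
    ∀ n, n ≤ grid.length → ∀ m, InvA food grid m x 0 →
      InvA food grid ((List.range n).foldl (fun m y => pvBodyA grid m x y) m) x n := by
  intro n
  induction n with
  | zero => intro _ m h; simpa using h
  | succ n ih =>
    intro hn m h
    rw [List.range_succ, List.foldl_append]
    exact inv_body food grid hP _ x n hx (by omega) (ih (by omega) m h)

lemma inv_shift (food : Int) (grid : List (List Int)) (m : List (List (List Int))) (x : Nat)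
    (h : InvA food grid m x grid.length) : InvA food grid m (x+1) 0 := by
  obtain ⟨hlen, hrows, hcells⟩ := h
  refine ⟨hlen, hrows, ?_⟩
  intro i j hi hj
  rw [hcells i j hi hj]
  rw [pvProc_eq (x+1) 0 x grid.length i j (by omega)]

lemma inv_outer (food : Int) (grid : List (List Int))
    (hP : ∀ row ∈ grid, grid.length ≤ row.length) :
    ∀ n, n ≤ grid.length → ∀ m, InvA food grid m 0 0 →
      InvA food grid ((List.range n).foldl (fun m x =>
        (List.range grid.length).foldl (fun m y => pvBodyA grid m x y) m) m) n 0 := by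
  intro n
  induction n with
  | zero => intro _ m h; simpa using h
  | succ n ih =>
    intro hn m h
    rw [List.range_succ, List.foldl_append]
    exact inv_shift food grid _ n
      (inv_inner food grid hP n (by omega) grid.length le_rfl _ (ih (by omega) m h))

-- ---- B-side: the memo stays coherent with cellR ----

def InvM (food : Int) (grid : List (List Int)) (memo : PySem.Dict (Int × Int) (List Int)) : Prop :=
  ∀ (p : Int × Int) (l : List Int), memo.get? p = some l →
    ∃ x y : Nat, p = ((x : Int), (y : Int)) ∧ l = cellR food grid x y

lemma invM_insert (food : Int) (grid : List (List Int))
    (memo : PySem.Dict (Int × Int) (List Int)) (hm : InvM food grid memo) (x y : Nat) :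
    InvM food grid (memo.insert ((x : Int), (y : Int)) (cellR food grid x y)) := by
  intro p l hget
  rw [PySem.Dict.get?_insert] at hget
  by_cases hp : p = ((x : Int), (y : Int))
  · rw [if_pos hp] at hget
    exact ⟨x, y, hp, by injection hget with h; exact h.symm⟩
  · rw [if_neg hp] at hget
    exact hm p l hget

lemma reachB_zero (food : Int) (grid : List (List Int))
    (memo : PySem.Dict (Int × Int) (List Int)) (hm : InvM food grid memo) :
    (reachB food grid 0 0 memo).1 = cellR food grid 0 0 ∧
      InvM food grid (reachB food grid 0 0 memo).2 := by
  rw [reachB.eq_def]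
  cases hget : memo.get? ((0 : Int), (0 : Int)) with
  | some v =>
    simp only []
    obtain ⟨x', y', hp, rfl⟩ := hm _ _ hget
    obtain ⟨hx', hy'⟩ : 0 = x' ∧ 0 = y' := by
      have h1 := congrArg Prod.fst hp; have h2 := congrArg Prod.snd hp
      simp only [] at h1 h2
      exact ⟨by exact_mod_cast h1, by exact_mod_cast h2⟩
    subst hx'; subst hy'
    exact ⟨rfl, hm⟩
  | none =>
    simp only []
    have hfood : PySem.Set.add PySem.Set.empty food = cellR food grid 0 0 := by
      rw [cellR, PySem.Set.add_eq_ite]; simp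
    rw [if_pos (⟨trivial, trivial⟩ : True ∧ True)]
    refine ⟨by simpa using hfood, ?_⟩
    simpa using (by rw [hfood]; exact invM_insert food grid memo hm 0 0 :
      InvM food grid (memo.insert ((0 : Int), (0 : Int)) (PySem.Set.add PySem.Set.empty food)))

lemma reachB_correct (food : Int) (grid : List (List Int)) :
    ∀ (x y : Nat) (memo : PySem.Dict (Int × Int) (List Int)), InvM food grid memo →
      (reachB food grid x y memo).1 = cellR food grid x y ∧
        InvM food grid (reachB food grid x y memo).2 := by
  have main : ∀ (n x y : Nat), x + y ≤ n → ∀ memo, InvM food grid memo →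
      (reachB food grid x y memo).1 = cellR food grid x y ∧
        InvM food grid (reachB food grid x y memo).2 := by
    intro n
    induction n with
    | zero =>
      intro x y hxy memo hm
      obtain ⟨rfl, rfl⟩ : x = 0 ∧ y = 0 := by omega
      exact reachB_zero food grid memo hm
    | succ n ih =>
      intro x y hxy memo hm
      by_cases h00 : x = 0 ∧ y = 0
      · obtain ⟨rfl, rfl⟩ := h00
        exact reachB_zero food grid memo hm
      · rw [reachB.eq_def]
        cases hget : memo.get? ((x : Int), (y : Int)) with
        | some v =>
          simp only []
          obtain ⟨x', y', hp, rfl⟩ := hm _ _ hget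
          obtain ⟨hx', hy'⟩ : x = x' ∧ y = y' := by
            constructor <;> [have := congrArg Prod.fst hp; have := congrArg Prod.snd hp] <;>
              simpa using this
          subst hx'; subst hy'
          exact ⟨rfl, hm⟩
        | none =>
          simp only []
          have hxy00 : ¬((x : Int) = 0 ∧ (y : Int) = 0) := by
            intro hc; exact h00 ⟨by exact_mod_cast hc.1, by exact_mod_cast hc.2⟩
          rw [if_neg hxy00]
          simp only [Int.toNat_natCast]
          by_cases hx0 : 0 < x
          · have hx0' : (0 : Int) < (x : Int) := by exact_mod_cast hx0
            have hc1 : ((x : Int) - 1) = ((x - 1 : Nat) : Int) := by omega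
            rw [dif_pos hx0', hc1]
            obtain ⟨hu, hm1⟩ := ih (x-1) y (by omega) memo hm
            by_cases hy0 : 0 < y
            · have hy0' : (0 : Int) < (y : Int) := by exact_mod_cast hy0
              have hc2 : ((y : Int) - 1) = ((y - 1 : Nat) : Int) := by omega
              rw [dif_pos hy0', hc2]
              obtain ⟨hl, hm2⟩ := ih x (y-1) (by omega) _ hm1
              rw [hu, hl]
              obtain ⟨a, rfl⟩ : ∃ a, x = a + 1 := ⟨x - 1, by omega⟩
              obtain ⟨b, rfl⟩ : ∃ b, y = b + 1 := ⟨y - 1, by omega⟩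
              simp only [Nat.add_sub_cancel]
              have hsrc : PySem.Set.union (PySem.Set.union PySem.Set.empty (cellR food grid a (b+1)))
                  (cellR food grid (a+1) b)
                  = PySem.Set.ofList (cellR food grid a (b+1) ++ cellR food grid (a+1) b) := by
                show PySem.Set.update (PySem.Set.update PySem.Set.empty _) _ = _
                rw [PySem.Set.update_empty, ← PySem.Set.ofList_append]
              have hvals : (PySem.Set.union (PySem.Set.union PySem.Set.empty (cellR food grid a (b+1)))
                    (cellR food grid (a+1) b)).foldl
                    (fun s v => PySem.Set.add s (v - pvGrid grid (a+1) (b+1))) PySem.Set.empty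
                  = cellR food grid (a+1) (b+1) := by
                rw [foldl_add_sub_eq, PySem.Set.update_empty, hsrc,
                  setify (subInj (pvGrid grid (a+1) (b+1))), cellR]
              exact ⟨hvals, by rw [hvals]; exact invM_insert food grid _ hm2 (a+1) (b+1)⟩
            · have hy0' : ¬((0 : Int) < (y : Int)) := by exact_mod_cast hy0
              rw [dif_neg hy0']
              rw [hu]
              obtain ⟨a, rfl⟩ : ∃ a, x = a + 1 := ⟨x - 1, by omega⟩
              obtain ⟨rfl⟩ : y = 0 := by omega
              simp only [Nat.add_sub_cancel]
              have hvals : (PySem.Set.union PySem.Set.empty (cellR food grid a 0)).foldl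
                    (fun s v => PySem.Set.add s (v - pvGrid grid (a+1) 0)) PySem.Set.empty
                  = cellR food grid (a+1) 0 := by
                rw [foldl_add_sub_eq, PySem.Set.update_empty]
                have : PySem.Set.union PySem.Set.empty (cellR food grid a 0)
                    = PySem.Set.ofList (cellR food grid a 0) := PySem.Set.update_empty _
                rw [this, setify (subInj (pvGrid grid (a+1) 0)), cellR]
              exact ⟨hvals, by rw [hvals]; exact invM_insert food grid _ hm1 (a+1) 0⟩
          · have hx0' : ¬((0 : Int) < (x : Int)) := by exact_mod_cast hx0
            rw [dif_neg hx0']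
            have hy0 : 0 < y := by omega
            have hy0' : (0 : Int) < (y : Int) := by exact_mod_cast hy0
            have hc2 : ((y : Int) - 1) = ((y - 1 : Nat) : Int) := by omega
            rw [dif_pos hy0', hc2]
            obtain ⟨hl, hm1⟩ := ih x (y-1) (by omega) memo hm
            rw [hl]
            obtain ⟨rfl⟩ : x = 0 := by omega
            obtain ⟨b, rfl⟩ : ∃ b, y = b + 1 := ⟨y - 1, by omega⟩
            simp only [Nat.add_sub_cancel]
            have hvals : (PySem.Set.union PySem.Set.empty (cellR food grid 0 b)).foldl
                  (fun s v => PySem.Set.add s (v - pvGrid grid 0 (b+1))) PySem.Set.empty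
                = cellR food grid 0 (b+1) := by
              rw [foldl_add_sub_eq, PySem.Set.update_empty]
              have : PySem.Set.union PySem.Set.empty (cellR food grid 0 b)
                  = PySem.Set.ofList (cellR food grid 0 b) := PySem.Set.update_empty _
              rw [this, setify (subInj (pvGrid grid 0 (b+1))), cellR]
            exact ⟨hvals, by rw [hvals]; exact invM_insert food grid _ hm1 0 (b+1)⟩
  intro x y memo hm
  exact main (x + y) x y le_rfl memo hm

-- ---- final scan: A's running min-nonnegative fold = min(filter) with default -1 ----

lemma scanA_ge (L : List Int) : ∀ a : Int, 0 ≤ a →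
    L.foldl (fun x el => if el ≥ 0 ∧ (el < x ∨ x < 0) then el else x) a =
      (L.filter (fun v => decide (0 ≤ v))).foldl min a := by
  induction L with
  | nil => intro a _; simp
  | cons v t ih =>
    intro a ha
    by_cases hv : 0 ≤ v
    · simp only [List.foldl_cons, List.filter_cons, hv, decide_true, if_pos]
      by_cases hlt : v < a
      · rw [if_pos ⟨trivial, Or.inl hlt⟩, ih v hv]
        congr 1
        omega
      · rw [if_neg (by intro hc; rcases hc.2 with h | h <;> omega), ih a ha]
        congr 1
        omega
    · simp only [List.foldl_cons, List.filter_cons, hv, decide_false]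
      rw [if_neg (fun hc => hc.1.elim)]
      exact ih a ha

lemma scanA (L : List Int) :
    L.foldl (fun x el => if el ≥ 0 ∧ (el < x ∨ x < 0) then el else x) (-1) =
      (match L.filter (fun v => decide (0 ≤ v)) with
        | [] => (-1 : Int)
        | v :: t => t.foldl min v) := by
  induction L with
  | nil => rfl
  | cons v t ih =>
    by_cases hv : 0 ≤ v
    · simp only [List.foldl_cons, List.filter_cons, hv, decide_true, if_pos]
      rw [if_pos ⟨trivial, Or.inr (by norm_num)⟩]
      exact scanA_ge t v hv
    · simp only [List.foldl_cons, List.filter_cons, hv, decide_false]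
      rw [if_neg (fun hc => hc.1.elim)]
      exact ih

lemma get2_m0 (grid : List (List Int)) (i j : Nat) :
    pvGet2 (grid.map (fun r => r.map (fun _ => (PySem.Set.empty : PySem.Set Int)))) i j = [] := by
  unfold pvGet2
  simp only [List.getD, List.getElem?_map]
  cases grid[i]? with
  | none => simp
  | some r =>
    show ((r.map (fun _ => (PySem.Set.empty : PySem.Set Int))).getD j []) = []
    simp only [List.getD, List.getElem?_map]
    cases r[j]? <;> rfl

lemma rowlen_m0 (grid : List (List Int)) (i : Nat) :
    ((grid.map (fun r => r.map (fun _ => (PySem.Set.empty : PySem.Set Int)))).getD i []).length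
      = (grid.getD i []).length := by
  simp only [List.getD, List.getElem?_map]
  cases grid[i]? <;> simp

lemma invA_init (food : Int) (grid : List (List Int)) (h1 : 0 < grid.length)
    (hrow0 : grid.length ≤ (grid.getD 0 []).length) :
    InvA food grid
      (pvSet2 (grid.map (fun r => r.map (fun _ => (PySem.Set.empty : PySem.Set Int)))) 0 0
        (PySem.Set.add
          (pvGet2 (grid.map (fun r => r.map (fun _ => (PySem.Set.empty : PySem.Set Int)))) 0 0) food))
      0 0 := by
  have hx0 : 0 < (grid.map (fun r => r.map (fun _ => (PySem.Set.empty : PySem.Set Int)))).length := by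
    simpa using h1
  have hy0 : 0 < ((grid.map (fun r => r.map (fun _ => (PySem.Set.empty : PySem.Set Int)))).getD 0 []).length := by
    rw [rowlen_m0]; omega
  refine ⟨(shape_set2 _ _ _ _).1.trans (by simp), ?_, ?_⟩
  · intro i
    rw [(shape_set2 _ _ _ _).2 i, rowlen_m0]
  · intro i j hi hj
    rw [get2_set2 _ _ _ _ _ _ hx0 hy0]
    by_cases hij : i = 0 ∧ j = 0
    · obtain ⟨rfl, rfl⟩ := hij
      rw [if_pos ⟨rfl, rfl⟩, get2_m0, if_pos (by simp [pvProc]), cellR, PySem.Set.add_eq_ite]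
      simp
    · rw [if_neg hij, get2_m0 grid i j,
        if_neg (by simp only [pvProc, decide_eq_true_eq]; omega)]

-- ===== VERDICT (by name: the statement is the Claim_ definition above) =====
theorem answer_spec : Claim_equal_answer := by
  unfold Claim_equal_answer
  intro food grid _ hpre
  unfold Spec_answer
  obtain ⟨hne, hP⟩ := hpre
  have hlg : 0 < grid.length := List.length_pos_of_ne_nil hne
  have hrow0 : grid.length ≤ (grid.getD 0 []).length :=
    hP _ (by rw [List.getD_eq_getElem _ _ hlg]; exact List.getElem_mem _)
  simp only [answer, answer_alt]
  have hinv := inv_outer food grid hP grid.length le_rfl _ (invA_init food grid hlg hrow0)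
  have hcorner := hinv.2.2 (grid.length - 1) (grid.length - 1) (by omega) (by omega)
  rw [hcorner, if_pos (by simp only [pvProc, decide_eq_true_eq]; omega)]
  have hc : ((grid.length : Int) - 1) = ((grid.length - 1 : Nat) : Int) := by omega
  rw [hc]
  have hreach := (reachB_correct food grid (grid.length - 1) (grid.length - 1) PySem.Dict.empty
    (by intro p l h; rw [PySem.Dict.get?_empty] at h; cases h)).1
  rw [hreach, scanA]
  cases hf : (cellR food grid (grid.length - 1) (grid.length - 1)).filter (fun v => decide (0 ≤ v)) with
  | nil =>
    have : PySem.List.min? ([] : List Int) (fun v => v) = none := by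
      rw [PySem.List.min?_eq_none_iff]
    rw [this]
  | cons v t =>
    rw [PySem.List.min?_id_cons]
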